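-- pv_equiv track=rewrite | github.com/shayaanhu/Codebros | Codeforces/mt08081/CONTESTS/1016/D.py | find_position_of_number
-- ===== SOURCE A (Python) =====
-- def find_position_of_number(number, row_start, col_start, size, start_num):
--     if size == 2:
--         # Base case: 2×2 grid
--         if number == start_num:  # Top left
--             return row_start, col_start
--         elif number == start_num + 1:  # Bottom right
--             return row_start+1, col_start+1
--         elif number == start_num + 2:  # Bottom left
--             return row_start+1, col_start
--         elif number == start_num + 3:  # Top right
--             return row_start, col_start+1
--
--     half_size = size // 2
--     smallSize = (half_size * half_size)
--
--     if number < start_num + smallSize: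
--         # Top left
--         return find_position_of_number(number, row_start, col_start, half_size, start_num)
--     elif number < start_num + 2 * smallSize:
--         # Bottom right
--         return find_position_of_number(number, row_start + half_size, col_start + half_size,
--                                      half_size, start_num + smallSize)
--     elif number < start_num + 3 * smallSize:
--         # Bottom left
--         return find_position_of_number(number, row_start + half_size, col_start,
--                                      half_size, start_num + 2 * smallSize)
--     else:
--         # Top right
--         return find_position_of_number(number, row_start, col_start + half_size,
--                                      half_size, start_num + 3 * smallSize)
-- ===== SOURCE B (Python) =====
-- def find_position_of_number(number, row_start, col_start, size, start_num):
--     # Decode the Z-order offset digit by digit (base-4 digits, quadrant order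
--     # TL, BR, BL, TR), instead of recursing with threshold comparisons.
--     assert size >= 2 and size & (size - 1) == 0, "size must be a power of two >= 2"
--     off = number - start_num
--     while size > 2:
--         half = size // 2
--         d, off = divmod(off, half * half)
--         dr, dc = [(0, 0), (half, half), (half, 0), (0, half)][d]
--         row_start += dr
--         col_start += dc
--         size = half
--     return [(row_start, col_start),
--             (row_start + 1, col_start + 1),
--             (row_start + 1, col_start),
--             (row_start, col_start + 1)][off]
-- ===== Notes on version B (the rewrite author's own statement) =====
-- stated objective: alternative
-- what changed: Replaces the four-way threshold recursion with an iterative base-4 digit decoding of the Z-order offset (divmod picks the quadrant digit, a 4-entry move table updates the coordinates, the final cell comes from a 4-entry table), with no start_num tracking and no recursion.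
-- outside the precondition, e.g. on find_position_of_number(3, 4, 0, 137, 1): A returns (5, 0), B raises AssertionError
import Mathlib
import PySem

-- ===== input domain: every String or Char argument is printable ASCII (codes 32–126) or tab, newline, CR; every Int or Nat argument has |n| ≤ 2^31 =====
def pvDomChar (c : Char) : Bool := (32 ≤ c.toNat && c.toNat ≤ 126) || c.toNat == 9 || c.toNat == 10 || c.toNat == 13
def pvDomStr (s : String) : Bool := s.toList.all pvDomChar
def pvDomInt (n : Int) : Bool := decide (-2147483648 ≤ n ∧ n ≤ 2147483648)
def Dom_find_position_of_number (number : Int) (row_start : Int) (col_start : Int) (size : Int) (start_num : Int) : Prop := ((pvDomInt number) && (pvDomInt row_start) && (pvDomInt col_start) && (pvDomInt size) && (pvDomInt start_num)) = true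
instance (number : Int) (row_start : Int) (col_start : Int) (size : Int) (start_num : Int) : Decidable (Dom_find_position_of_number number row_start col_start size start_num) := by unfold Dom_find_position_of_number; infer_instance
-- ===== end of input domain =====

-- B decodes the Z-order offset by base-4 digit extraction in an iterative loop instead of
-- A's four-way threshold recursion; same O(log size) cost, different decomposition.

-- ===== PORT A =====
-- A is recursive with no base case off the happy path: fuel (size.natAbs + 1) only makes the
-- recursion total in Lean; on Pre_ inputs it is never exhausted (A raises RecursionError there).
def pvGoA : Nat → Int → Int → Int → Int → Int → Int × Int
  | 0, _, _, _, _, _ => (0, 0)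
  | f+1, n, r, c, size, s =>
    let cont := fun (_ : Unit) =>
      let half := PySem.Int.floordiv size 2
      let small := half * half
      if n < s + small then pvGoA f n r c half s
      else if n < s + 2 * small then pvGoA f n (r + half) (c + half) half (s + small)
      else if n < s + 3 * small then pvGoA f n (r + half) c half (s + 2 * small)
      else pvGoA f n r (c + half) half (s + 3 * small)
    if size = 2 then
      if n = s then (r, c)
      else if n = s + 1 then (r + 1, c + 1)
      else if n = s + 2 then (r + 1, c)
      else if n = s + 3 then (r, c + 1)
      else cont ()
    else cont ()

def find_position_of_number (number : Int) (row_start : Int) (col_start : Int) (size : Int) (start_num : Int) : Int × Int :=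
  pvGoA (size.natAbs + 1) number row_start col_start size start_num

-- ===== PORT B =====
-- the while loop of Source B; state (off, row_start, col_start), fuel size.natAbs bounds the
-- iteration count (the loop strictly decreases size while size > 2).
def pvGoB : Nat → Int → Int → Int → Int → Int × Int × Int
  | 0, off, r, c, _ => (off, r, c)
  | f+1, off, r, c, size =>
    if 2 < size then
      let half := PySem.Int.floordiv size 2
      let d := PySem.Int.floordiv off (half * half)      -- divmod(off, half*half): divisor > 0 here
      let off' := PySem.Int.mod off (half * half)
      match PySem.List.pyGet? [((0 : Int), (0 : Int)), (half, half), (half, 0), (0, half)] d with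
      | some (dr, dc) => pvGoB f off' (r + dr) (c + dc) half
      | none => (off', r, c)      -- IndexError in Python; only reachable outside Pre_
    else (off, r, c)

def find_position_of_number_alt (number : Int) (row_start : Int) (col_start : Int) (size : Int) (start_num : Int) : Int × Int :=
  if 2 ≤ size ∧ PySem.Int.band size (size - 1) = 0 then      -- Source B's assert (power of two ≥ 2)
    match pvGoB size.natAbs (number - start_num) row_start col_start size with
    | (off, r, c) =>
      match PySem.List.pyGet? [(r, c), (r + 1, c + 1), (r + 1, c), (r, c + 1)] off with
      | some p => p
      | none => (0, 0)      -- IndexError in Python; only reachable outside Pre_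
  else (0, 0)      -- AssertionError in Python; only reachable outside Pre_

-- ===== PRECONDITION & SPEC =====
-- Pre_ excludes inputs where A raises RecursionError (out-of-range number, size < 2) and
-- non-power-of-two sizes, for which the quadrant areas do not tile the grid and A either
-- raises or returns an accidental value of its halving chain; B asserts size is a power of
-- two ≥ 2 and raises AssertionError on all such sizes.
def Pre_find_position_of_number (number : Int) (row_start : Int) (col_start : Int) (size : Int) (start_num : Int) : Prop :=
  2 ≤ size ∧ size = (2 : Int) ^ (Nat.log2 size.natAbs) ∧
  start_num ≤ number ∧ number < start_num + size * size
instance (number : Int) (row_start : Int) (col_start : Int) (size : Int) (start_num : Int) : Decidable (Pre_find_position_of_number number row_start col_start size start_num) := by unfold Pre_find_position_of_number; infer_instance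

def pvWitness_find_position_of_number : Int × Int × Int × Int × Int := (2, 5, 7, 4, 0)

def Spec_find_position_of_number (number : Int) (row_start : Int) (col_start : Int) (size : Int) (start_num : Int) (out : Int × Int) : Prop := out = find_position_of_number_alt number row_start col_start size start_num
instance (number : Int) (row_start : Int) (col_start : Int) (size : Int) (start_num : Int) (out : Int × Int) : Decidable (Spec_find_position_of_number number row_start col_start size start_num out) := by unfold Spec_find_position_of_number; infer_instance

-- ===== CLAIM (what is proved, stated in full; the proofs are below) =====
def Claim_equal_find_position_of_number : Prop := ∀ (number : Int) (row_start : Int) (col_start : Int) (size : Int) (start_num : Int), Dom_find_position_of_number number row_start col_start size start_num → Pre_find_position_of_number number row_start col_start size start_num → Spec_find_position_of_number number row_start col_start size start_num (find_position_of_number number row_start col_start size start_num)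

-- ===== LEMMAS AND PROOFS =====

-- Source B's final four-way dispatch, as a function of the loop's final state (proof-side only)
def pvFinish (st : Int × Int × Int) : Int × Int :=
  match st with
  | (off, r, c) =>
    match PySem.List.pyGet? [(r, c), (r + 1, c + 1), (r + 1, c), (r, c + 1)] off with
    | some p => p
    | none => (0, 0)

lemma pvBand_pow (n : Nat) : PySem.Int.band ((2 : Int) ^ (n + 1)) ((2 : Int) ^ (n + 1) - 1) = 0 := by
  have h1 : ((2 : Int) ^ (n + 1)) = ((2 ^ (n + 1) : Nat) : Int) := by push_cast; ring
  have hle : 1 ≤ 2 ^ (n + 1) := Nat.one_le_two_pow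
  have h2 : ((2 : Int) ^ (n + 1) - 1) = ((2 ^ (n + 1) - 1 : Nat) : Int) := by push_cast [hle]; ring
  rw [h2, h1, PySem.Int.band_natCast]
  have hz : (2 ^ (n + 1) &&& (2 ^ (n + 1) - 1) : Nat) = 0 := by
    apply Nat.eq_of_testBit_eq
    intro i
    simp
  rw [hz]
  rfl

lemma pvHalf_pow (k : Nat) : PySem.Int.floordiv ((2 : Int) ^ (k + 1)) 2 = 2 ^ k := by
  rw [PySem.Int.floordiv_eq_ediv_of_pos (by norm_num), pow_succ]
  exact Int.mul_ediv_cancel _ (by norm_num)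

lemma pvMain : ∀ (k : Nat) (fa fb : Nat) (n r c s : Int), k + 1 ≤ fa → k ≤ fb →
    s ≤ n → n < s + 2 ^ (k + 1) * 2 ^ (k + 1) →
    pvGoA fa n r c ((2 : Int) ^ (k + 1)) s = pvFinish (pvGoB fb (n - s) r c ((2 : Int) ^ (k + 1))) := by
  intro k
  induction k with
  | zero =>
    intro fa fb n r c s hfa _ hlo hhi
    obtain ⟨fa, rfl⟩ : ∃ f, fa = f + 1 := ⟨fa - 1, by omega⟩
    have hsz : ((2 : Int) ^ (0 + 1)) = 2 := by norm_num
    rw [hsz] at hhi ⊢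
    have hB : pvGoB fb (n - s) r c 2 = (n - s, r, c) := by
      cases fb with
      | zero => rfl
      | succ f => simp [pvGoB]
    rw [hB]
    have h4 : n = s ∨ n = s + 1 ∨ n = s + 2 ∨ n = s + 3 := by omega
    rcases h4 with rfl | rfl | rfl | rfl <;>
      simp [pvGoA, pvFinish, PySem.List.pyGet?, PySem.List.pyIdx?,
        show ∀ t : Int, t + 1 - t = 1 from fun t => by omega,
        show ∀ t : Int, t + 2 - t = 2 from fun t => by omega,
        show ∀ t : Int, t + 3 - t = 3 from fun t => by omega]
  | succ k ih =>
    intro fa fb n r c s hfa hfb hlo hhi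
    obtain ⟨fa, rfl⟩ : ∃ f, fa = f + 1 := ⟨fa - 1, by omega⟩
    obtain ⟨fb, rfl⟩ : ∃ f, fb = f + 1 := ⟨fb - 1, by omega⟩
    have h4le : (4 : Int) ≤ 2 ^ (k + 1 + 1) := by
      calc (4 : Int) = 2 ^ 2 := by norm_num
      _ ≤ 2 ^ (k + 1 + 1) := pow_le_pow_right₀ (by norm_num) (by omega)
    have hne2 : ((2 : Int) ^ (k + 1 + 1)) ≠ 2 := by omega
    have hgt2 : (2 : Int) < 2 ^ (k + 1 + 1) := by omega
    have hhalf := pvHalf_pow (k + 1)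
    have hspos : (0 : Int) < 2 ^ (k + 1) * 2 ^ (k + 1) :=
      mul_pos (pow_pos (by norm_num) _) (pow_pos (by norm_num) _)
    have hsq : (2 : Int) ^ (k + 1 + 1) * 2 ^ (k + 1 + 1) = 4 * (2 ^ (k + 1) * 2 ^ (k + 1)) := by
      rw [pow_succ]; ring
    set small : Int := 2 ^ (k + 1) * 2 ^ (k + 1) with hsmall
    -- unfold one step of each program
    simp only [pvGoA, pvGoB, if_neg hne2, if_pos hgt2, hhalf]
    by_cases h1 : n < s + small
    · have hd : PySem.Int.floordiv (n - s) small = 0 :=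
        (PySem.Int.floordiv_eq_iff_of_pos hspos).2 (by constructor <;> [omega; (simp only [zero_add, one_mul]; omega)])
      have hmod : PySem.Int.mod (n - s) small = n - s := by
        have h := PySem.Int.floordiv_mul_add_mod (n - s) small
        rw [hd] at h; omega
      rw [if_pos h1, hd, hmod]
      have := ih fa fb n r c s (by omega) (by omega) hlo (by omega)
      simpa [PySem.List.pyGet?, PySem.List.pyIdx?] using this
    · by_cases h2 : n < s + 2 * small
      · have hd : PySem.Int.floordiv (n - s) small = 1 :=
          (PySem.Int.floordiv_eq_iff_of_pos hspos).2 (by constructor <;> [(simp only [one_mul]; omega); omega])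
        have hmod : PySem.Int.mod (n - s) small = n - (s + small) := by
          have h := PySem.Int.floordiv_mul_add_mod (n - s) small
          rw [hd] at h; omega
        rw [if_neg h1, if_pos h2, hd, hmod]
        have := ih fa fb n (r + 2 ^ (k + 1)) (c + 2 ^ (k + 1)) (s + small) (by omega) (by omega) (by omega) (by omega)
        simpa [PySem.List.pyGet?, PySem.List.pyIdx?] using this
      · by_cases h3 : n < s + 3 * small
        · have hd : PySem.Int.floordiv (n - s) small = 2 :=
            (PySem.Int.floordiv_eq_iff_of_pos hspos).2 (by constructor <;> omega)
          have hmod : PySem.Int.mod (n - s) small = n - (s + 2 * small) := by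
            have h := PySem.Int.floordiv_mul_add_mod (n - s) small
            rw [hd] at h; omega
          rw [if_neg h1, if_neg h2, if_pos h3, hd, hmod]
          have := ih fa fb n (r + 2 ^ (k + 1)) c (s + 2 * small) (by omega) (by omega) (by omega) (by omega)
          simpa [PySem.List.pyGet?, PySem.List.pyIdx?] using this
        · have hd : PySem.Int.floordiv (n - s) small = 3 :=
            (PySem.Int.floordiv_eq_iff_of_pos hspos).2 (by constructor <;> omega)
          have hmod : PySem.Int.mod (n - s) small = n - (s + 3 * small) := by
            have h := PySem.Int.floordiv_mul_add_mod (n - s) small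
            rw [hd] at h; omega
          rw [if_neg h1, if_neg h2, if_neg h3, hd, hmod]
          have := ih fa fb n r (c + 2 ^ (k + 1)) (s + 3 * small) (by omega) (by omega) (by omega) (by omega)
          simpa [PySem.List.pyGet?, PySem.List.pyIdx?] using this

-- ===== VERDICT (by name: the statement is the Claim_ definition above) =====
theorem find_position_of_number_spec : Claim_equal_find_position_of_number := by
  intro n r c size s _ hpre
  obtain ⟨hsz, hpow, hlo, hhi⟩ := hpre
  have hk1 : 1 ≤ Nat.log2 size.natAbs := by
    by_contra h
    have h0 : Nat.log2 size.natAbs = 0 := by omega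
    rw [h0] at hpow
    norm_num at hpow
    omega
  obtain ⟨m, hm⟩ : ∃ m, Nat.log2 size.natAbs = m + 1 := ⟨Nat.log2 size.natAbs - 1, by omega⟩
  rw [hm] at hpow
  have hnat : size.natAbs = 2 ^ (m + 1) := by
    have := congrArg Int.natAbs hpow
    simpa [Int.natAbs_pow] using this
  have hfuel : m + 1 ≤ 2 ^ (m + 1) := Nat.le_of_lt (Nat.lt_two_pow_self)
  have hnat2 : ((2 : Int) ^ (m + 1)).natAbs = 2 ^ (m + 1) := by simp [Int.natAbs_pow]
  unfold Spec_find_position_of_number find_position_of_number find_position_of_number_alt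
  rw [hpow] at hhi hsz ⊢
  rw [hnat2, if_pos ⟨hsz, pvBand_pow m⟩]
  have := pvMain m (2 ^ (m + 1) + 1) (2 ^ (m + 1)) n r c s (by omega) (by omega) hlo (by omega)
  rw [this]
  rfl
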